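-- pv_equiv track=rewrite | github.com/davidson-engineering/parameter | src/parameter/parameter.py | cancel_common_units
-- ===== SOURCE A (Python) =====
-- import itertools
-- from collections import Counter
--
-- def flatten_list(list_: list) -> list:
--     '''
--     Flatten a nested list
--     '''
--     return list(itertools.chain.from_iterable(list_))
--
-- def cancel_common_units(numerator: list, denominator: list):
--     num_counter = Counter(numerator)
--     den_counter = Counter(denominator)
--     for unit, count in num_counter.items():
--         if unit in denominator:
--             if count > den_counter[unit]:
--                 num_counter[unit] -= den_counter[unit]
--                 den_counter[unit] = 0
--             else:
--                 den_counter[unit] -= num_counter[unit]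
--                 num_counter[unit] = 0
--     numerator_cancelled = [[unit for _ in range(count)] for unit, count in num_counter.items() if count > 0]
--     denominator_cancelled = [[unit for _ in range(count)] for unit, count in den_counter.items() if count > 0]
--     return flatten_list(numerator_cancelled), flatten_list(denominator_cancelled)
-- ===== SOURCE B (Python) =====
-- def cancel_common_units(numerator: list, denominator: list):
--     # No Counter / count-dict at all: one pass per list over first occurrences,
--     # counting directly with list.count.
--     def residue(src, other):
--         seen = set()
--         out = []
--         for u in src:
--             if u not in seen:
--                 seen.add(u)
--                 out.extend([u] * (src.count(u) - other.count(u)))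
--         return out
--     return residue(numerator, denominator), residue(denominator, numerator)
-- ===== Notes on version B (the rewrite author's own statement) =====
-- stated objective: alternative
-- what changed: Drops Counter/count-dicts entirely: B makes one pass over each list and, at each first occurrence of a unit, emits max(src.count(u) - other.count(u), 0) copies via direct list.count scans, instead of A's two Counters mutually mutated by a per-unit subtraction loop; B trades counting data structures for repeated scans, so it is quadratic in the number of distinct units.
import Mathlib
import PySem

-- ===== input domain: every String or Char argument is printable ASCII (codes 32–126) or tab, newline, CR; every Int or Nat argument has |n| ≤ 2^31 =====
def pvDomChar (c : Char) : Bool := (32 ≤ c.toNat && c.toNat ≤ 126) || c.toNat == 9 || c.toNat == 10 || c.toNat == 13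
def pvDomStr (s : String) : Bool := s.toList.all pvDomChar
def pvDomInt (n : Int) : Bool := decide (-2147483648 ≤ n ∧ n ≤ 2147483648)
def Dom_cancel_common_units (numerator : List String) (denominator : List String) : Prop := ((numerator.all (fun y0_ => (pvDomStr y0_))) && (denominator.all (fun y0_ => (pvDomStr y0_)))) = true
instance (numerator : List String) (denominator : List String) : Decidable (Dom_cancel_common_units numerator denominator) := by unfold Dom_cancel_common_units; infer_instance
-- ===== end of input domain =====

-- B drops Counter/dicts entirely: one pass per list over first occurrences, emitting
-- max(count difference, 0) copies via direct list.count scans; same return values.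

-- ===== PORT A =====
def flatten_list (list_ : List (List String)) : List String := list_.flatten

def cancelStep (denominator : List String)
    (st : PySem.Dict String Int × PySem.Dict String Int) (p : String × Int) :
    PySem.Dict String Int × PySem.Dict String Int :=
  if p.1 ∈ denominator then
    if p.2 > st.2.getD p.1 0 then
      (st.1.insert p.1 (st.1.getD p.1 0 - st.2.getD p.1 0), st.2.insert p.1 0)
    else
      (st.1.insert p.1 0, st.2.insert p.1 (st.2.getD p.1 0 - st.1.getD p.1 0))
  else st

def cancel_common_units (numerator : List String) (denominator : List String) : List String × List String :=
  let num_counter := PySem.Dict.counter numerator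
  let den_counter := PySem.Dict.counter denominator
  let st := num_counter.items.foldl (cancelStep denominator) (num_counter, den_counter)
  let numerator_cancelled := (st.1.items.filter (fun p => p.2 > 0)).map
      (fun p => (PySem.List.pyRange 0 p.2 1).map (fun _ => p.1))
  let denominator_cancelled := (st.2.items.filter (fun p => p.2 > 0)).map
      (fun p => (PySem.List.pyRange 0 p.2 1).map (fun _ => p.1))
  (flatten_list numerator_cancelled, flatten_list denominator_cancelled)

-- ===== PORT B =====
-- for u in src: if u not in seen: seen.add(u); out.extend([u] * (src.count(u) - other.count(u)))
-- (seen is a Python set = PySem.Set; [u] * k is [] for k ≤ 0, i.e. List.replicate k.toNat u)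
def residueStep (src other : List String) (st : PySem.Set String × List String) (u : String) :
    PySem.Set String × List String :=
  if u ∈ st.1 then st
  else (PySem.Set.add st.1 u, st.2 ++ List.replicate ((src.count u : Int) - (other.count u : Int)).toNat u)

def residue (src other : List String) : List String :=
  (src.foldl (residueStep src other) (PySem.Set.empty, [])).2

def cancel_common_units_alt (numerator : List String) (denominator : List String) : List String × List String :=
  (residue numerator denominator, residue denominator numerator)

-- ===== PRECONDITION & SPEC =====
def Spec_cancel_common_units (numerator : List String) (denominator : List String) (out : List String × List String) : Prop := out = cancel_common_units_alt numerator denominator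
instance (numerator : List String) (denominator : List String) (out : List String × List String) : Decidable (Spec_cancel_common_units numerator denominator out) := by unfold Spec_cancel_common_units; infer_instance

-- ===== CLAIM (what is proved, stated in full; the proofs are below) =====
def Claim_equal_cancel_common_units : Prop := ∀ (numerator : List String) (denominator : List String), Dom_cancel_common_units numerator denominator → Spec_cancel_common_units numerator denominator (cancel_common_units numerator denominator)

-- ===== LEMMAS AND PROOFS =====

-- A's loop: per-key characterisation of both dicts after the fold.
lemma foldA_char (den : List String) :
    ∀ (l : List (String × Int)) (nd dd : PySem.Dict String Int),
    (l.map Prod.fst).Nodup →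
    (∀ p ∈ l, nd.getD p.1 0 = p.2) →
    (∀ p ∈ l, dd.getD p.1 0 = (den.count p.1 : Int)) →
    (∀ p ∈ l, nd.contains p.1 = true) →
    (∀ p ∈ l, p.1 ∈ den → dd.contains p.1 = true) →
    ((l.foldl (cancelStep den) (nd, dd)).1.keys = nd.keys ∧
     (l.foldl (cancelStep den) (nd, dd)).2.keys = dd.keys) ∧
    (∀ p ∈ l,
      (l.foldl (cancelStep den) (nd, dd)).1.getD p.1 0 =
        (if p.1 ∈ den then (if p.2 > (den.count p.1 : Int) then p.2 - den.count p.1 else 0) else p.2) ∧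
      (l.foldl (cancelStep den) (nd, dd)).2.getD p.1 0 =
        (if p.1 ∈ den then (if p.2 > (den.count p.1 : Int) then 0 else (den.count p.1 : Int) - p.2) else (den.count p.1 : Int))) ∧
    (∀ v, v ∉ l.map Prod.fst →
      (l.foldl (cancelStep den) (nd, dd)).1.getD v 0 = nd.getD v 0 ∧
      (l.foldl (cancelStep den) (nd, dd)).2.getD v 0 = dd.getD v 0) := by
  intro l
  induction l with
  | nil =>
    intro nd dd _ _ _ _ _
    refine ⟨⟨rfl, rfl⟩, ?_, ?_⟩ <;> simp
  | cons q tl ih =>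
    intro nd dd hnd hn hd hcn hcd
    simp only [List.map_cons, List.nodup_cons] at hnd
    have hq1 : q.1 ∉ tl.map Prod.fst := hnd.1
    have hnq : nd.getD q.1 0 = q.2 := hn q (by simp)
    have hdq : dd.getD q.1 0 = (den.count q.1 : Int) := hd q (by simp)
    have hne : ∀ p ∈ tl, p.1 ≠ q.1 := by
      intro p hp hEq; exact hq1 (hEq ▸ List.mem_map_of_mem hp)
    simp only [List.foldl_cons]
    by_cases hmem : q.1 ∈ den
    · by_cases hgt : q.2 > dd.getD q.1 0
      · -- numerator wins
        have hstep : cancelStep den (nd, dd) q =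
            (nd.insert q.1 (nd.getD q.1 0 - dd.getD q.1 0), dd.insert q.1 0) := by
          simp only [cancelStep, if_pos hmem, if_pos hgt]
        rw [hstep]
        set nd' := nd.insert q.1 (nd.getD q.1 0 - dd.getD q.1 0) with hnd'
        set dd' := dd.insert q.1 0 with hdd'
        have hrec := ih nd' dd' hnd.2
          (fun p hp => by rw [hnd', PySem.Dict.getD_insert_of_ne _ _ _ (hne p hp)]; exact hn p (List.mem_cons_of_mem _ hp))
          (fun p hp => by rw [hdd', PySem.Dict.getD_insert_of_ne _ _ _ (hne p hp)]; exact hd p (List.mem_cons_of_mem _ hp))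
          (fun p hp => by rw [hnd', PySem.Dict.contains_insert, hcn p (List.mem_cons_of_mem _ hp)]; simp)
          (fun p hp hpd => by rw [hdd', PySem.Dict.contains_insert, hcd p (List.mem_cons_of_mem _ hp) hpd]; simp)
        obtain ⟨⟨hk1, hk2⟩, hpair, hout⟩ := hrec
        refine ⟨⟨?_, ?_⟩, ?_, ?_⟩
        · rw [hk1, hnd', PySem.Dict.keys_insert_of_contains _ _ (hcn q (by simp))]
        · rw [hk2, hdd', PySem.Dict.keys_insert_of_contains _ _ (hcd q (by simp) hmem)]
        · intro p hp
          rcases List.mem_cons.1 hp with hEq | hp'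
          · rw [hEq]
            have hgt' : q.2 > (den.count q.1 : Int) := hdq ▸ hgt
            refine ⟨?_, ?_⟩
            · rw [(hout q.1 hq1).1, hnd', PySem.Dict.getD_insert_self, hnq, hdq,
                if_pos hmem, if_pos hgt']
            · rw [(hout q.1 hq1).2, hdd', PySem.Dict.getD_insert_self,
                if_pos hmem, if_pos hgt']
          · exact hpair p hp'
        · intro v hv
          have hv' : v ∉ tl.map Prod.fst := fun h => hv (by simp [h])
          have hvq : v ≠ q.1 := fun h => hv (by simp [h])
          have := hout v hv'
          rw [this.1, this.2, hnd', hdd',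
            PySem.Dict.getD_insert_of_ne _ _ _ hvq, PySem.Dict.getD_insert_of_ne _ _ _ hvq]
          exact ⟨rfl, rfl⟩
      · -- denominator wins or tie
        have hstep : cancelStep den (nd, dd) q =
            (nd.insert q.1 0, dd.insert q.1 (dd.getD q.1 0 - nd.getD q.1 0)) := by
          simp only [cancelStep, if_pos hmem, if_neg hgt]
        rw [hstep]
        set nd' := nd.insert q.1 0 with hnd'
        set dd' := dd.insert q.1 (dd.getD q.1 0 - nd.getD q.1 0) with hdd'
        have hrec := ih nd' dd' hnd.2
          (fun p hp => by rw [hnd', PySem.Dict.getD_insert_of_ne _ _ _ (hne p hp)]; exact hn p (List.mem_cons_of_mem _ hp))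
          (fun p hp => by rw [hdd', PySem.Dict.getD_insert_of_ne _ _ _ (hne p hp)]; exact hd p (List.mem_cons_of_mem _ hp))
          (fun p hp => by rw [hnd', PySem.Dict.contains_insert, hcn p (List.mem_cons_of_mem _ hp)]; simp)
          (fun p hp hpd => by rw [hdd', PySem.Dict.contains_insert, hcd p (List.mem_cons_of_mem _ hp) hpd]; simp)
        obtain ⟨⟨hk1, hk2⟩, hpair, hout⟩ := hrec
        refine ⟨⟨?_, ?_⟩, ?_, ?_⟩
        · rw [hk1, hnd', PySem.Dict.keys_insert_of_contains _ _ (hcn q (by simp))]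
        · rw [hk2, hdd', PySem.Dict.keys_insert_of_contains _ _ (hcd q (by simp) hmem)]
        · intro p hp
          rcases List.mem_cons.1 hp with hEq | hp'
          · rw [hEq]
            have hgt' : ¬ q.2 > (den.count q.1 : Int) := hdq ▸ hgt
            refine ⟨?_, ?_⟩
            · rw [(hout q.1 hq1).1, hnd', PySem.Dict.getD_insert_self,
                if_pos hmem, if_neg hgt']
            · rw [(hout q.1 hq1).2, hdd', PySem.Dict.getD_insert_self, hnq, hdq,
                if_pos hmem, if_neg hgt']
          · exact hpair p hp'
        · intro v hv
          have hv' : v ∉ tl.map Prod.fst := fun h => hv (by simp [h])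
          have hvq : v ≠ q.1 := fun h => hv (by simp [h])
          have := hout v hv'
          rw [this.1, this.2, hnd', hdd',
            PySem.Dict.getD_insert_of_ne _ _ _ hvq, PySem.Dict.getD_insert_of_ne _ _ _ hvq]
          exact ⟨rfl, rfl⟩
    · -- unit not in denominator: state unchanged
      have hstep : cancelStep den (nd, dd) q = (nd, dd) := by
        simp only [cancelStep, if_neg hmem]
      rw [hstep]
      have hrec := ih nd dd hnd.2
        (fun p hp => hn p (List.mem_cons_of_mem _ hp))
        (fun p hp => hd p (List.mem_cons_of_mem _ hp))
        (fun p hp => hcn p (List.mem_cons_of_mem _ hp))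
        (fun p hp hpd => hcd p (List.mem_cons_of_mem _ hp) hpd)
      obtain ⟨⟨hk1, hk2⟩, hpair, hout⟩ := hrec
      refine ⟨⟨hk1, hk2⟩, ?_, ?_⟩
      · intro p hp
        rcases List.mem_cons.1 hp with hEq | hp'
        · rw [hEq]
          refine ⟨?_, ?_⟩
          · rw [(hout q.1 hq1).1, hnq, if_neg hmem]
          · rw [(hout q.1 hq1).2, hdq, if_neg hmem]
        · exact hpair p hp'
      · intro v hv
        exact hout v (fun h => hv (by simp [h]))

-- B's seen list grows by appending: foldl Set.add only extends its argument.
lemma foldl_setAdd_prefix (l : List String) :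
    ∀ s : List String, ∃ t, l.foldl PySem.Set.add s = s ++ t := by
  induction l with
  | nil => intro s; exact ⟨[], by simp⟩
  | cons u tl ih =>
    intro s
    simp only [List.foldl_cons]
    by_cases h : u ∈ s
    · rw [show PySem.Set.add s u = s by simp [PySem.Set.add, h]]
      exact ih s
    · rw [show PySem.Set.add s u = s ++ [u] by simp [PySem.Set.add, h]]
      rcases ih (s ++ [u]) with ⟨t, ht⟩
      exact ⟨u :: t, by rw [ht]; simp⟩
  
-- B's loop, characterised: out gains f of each newly seen key, seen becomes foldl Set.add.
lemma residue_fold (f : String → List String) (l : List String) :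
    ∀ (seen out : List String),
    (l.foldl (fun st u => if u ∈ st.1 then st else (st.1 ++ [u], st.2 ++ f u)) (seen, out))
      = (l.foldl PySem.Set.add seen,
         out ++ ((l.foldl PySem.Set.add seen).drop seen.length).flatMap f) := by
  induction l with
  | nil => intro seen out; simp
  | cons u tl ih =>
    intro seen out
    simp only [List.foldl_cons]
    by_cases h : u ∈ seen
    · rw [if_pos h, show PySem.Set.add seen u = seen by simp [PySem.Set.add, h]]
      exact ih seen out
    · rw [if_neg h, show PySem.Set.add seen u = seen ++ [u] by simp [PySem.Set.add, h]]
      rw [ih (seen ++ [u]) (out ++ f u)]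
      rcases foldl_setAdd_prefix tl (seen ++ [u]) with ⟨t, ht⟩
      rw [ht]
      have h1 : ((seen ++ [u]) ++ t).drop seen.length = u :: t := by
        rw [List.append_assoc, List.drop_append_of_le_length (le_refl _)]
        simp
      have h2 : ((seen ++ [u]) ++ t).drop (seen ++ [u]).length = t := by
        rw [List.drop_append_of_le_length (le_refl _)]
        simp
      rw [h1, h2, List.flatMap_cons]
      simp
  
-- residue src other enumerates the distinct keys of src in first-occurrence order.
lemma residue_eq (src other : List String) :
    residue src other = (PySem.Set.ofList src).flatMap
      (fun u => List.replicate ((src.count u : Int) - (other.count u : Int)).toNat u) := by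
  unfold residue
  rw [show (residueStep src other)
      = (fun (st : List String × List String) u => if u ∈ st.1 then st
          else (st.1 ++ [u], st.2 ++ (fun v => List.replicate ((src.count v : Int) - (other.count v : Int)).toNat v) u))
      by
        funext st u
        simp only [residueStep]
        by_cases h : u ∈ st.1
        · simp [h]
        · simp [h, PySem.Set.add]]
  rw [show (PySem.Set.empty : PySem.Set String) = ([] : List String) from rfl, residue_fold]
  simp [PySem.Set.ofList_eq_foldl]

-- A's per-key expansion reduces to a flatMap of replicates.
lemma pyRange_const_map (c : Int) (k : String) :
    (PySem.List.pyRange 0 c 1).map (fun _ => k) = List.replicate c.toNat k := by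
  rw [PySem.List.pyRange_one, List.map_map,
    show ((fun _ => k) ∘ fun (n:ℕ) => ((0:ℤ) + (n:ℤ))) = (fun _ => k) from rfl,
    List.map_const', List.length_range]
  norm_num

lemma expandA (f : String → Int) (S : List String) :
    (((S.map (fun k => (k, f k))).filter (fun p => p.2 > 0)).map
      (fun p => (PySem.List.pyRange 0 p.2 1).map (fun _ => p.1))).flatten
    = S.flatMap (fun k => List.replicate (f k).toNat k) := by
  induction S with
  | nil => rfl
  | cons k S ih =>
    simp only [List.map_cons, List.filter_cons, List.flatMap_cons]
    by_cases h : 0 < f k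
    · rw [if_pos (by simpa using h)]
      simp only [List.map_cons, List.flatten_cons, ih]
      congr 1
      exact pyRange_const_map (f k) k
    · rw [if_neg (by simpa using h)]
      rw [ih, Int.toNat_of_nonpos (by omega)]
      simp

-- ===== VERDICT (by name: the statement is the Claim_ definition above) =====
theorem cancel_common_units_spec : Claim_equal_cancel_common_units := by
  intro numerator denominator _
  unfold Spec_cancel_common_units
  have hitems : (PySem.Dict.counter numerator).items
      = (PySem.Set.ofList numerator).map (fun k => (k, (numerator.count k : Int))) :=
    PySem.Dict.items_counter numerator
  have hmapfst : ((PySem.Dict.counter numerator).items.map Prod.fst)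
      = PySem.Set.ofList numerator := by
    rw [hitems, List.map_map]; exact List.map_id' _
  have hnodup : ((PySem.Dict.counter numerator).items.map Prod.fst).Nodup := by
    rw [hmapfst]; exact PySem.Set.nodup_ofList numerator
  have hfold := foldA_char denominator (PySem.Dict.counter numerator).items
      (PySem.Dict.counter numerator) (PySem.Dict.counter denominator) hnodup
    (by
      intro p hp
      rw [hitems] at hp
      obtain ⟨k, _, rfl⟩ := List.mem_map.1 hp
      exact PySem.Dict.getD_counter numerator k)
    (fun p _ => PySem.Dict.getD_counter denominator p.1)
    (by
      intro p hp
      rw [hitems] at hp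
      obtain ⟨k, hk, rfl⟩ := List.mem_map.1 hp
      rw [PySem.Dict.contains_counter]
      simpa using (PySem.Set.mem_ofList numerator k).1 hk)
    (by
      intro p _ hpd
      rw [PySem.Dict.contains_counter]
      simpa using hpd)
  obtain ⟨⟨hk1, hk2⟩, hpair, hout⟩ := hfold
  set st := (PySem.Dict.counter numerator).items.foldl (cancelStep denominator)
      (PySem.Dict.counter numerator, PySem.Dict.counter denominator) with hst
  have hkeys1 : st.1.keys = PySem.Set.ofList numerator := by
    rw [hk1, PySem.Dict.keys_counter]
  have hkeys2 : st.2.keys = PySem.Set.ofList denominator := by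
    rw [hk2, PySem.Dict.keys_counter]
  have hitems1 : st.1.items = (PySem.Set.ofList numerator).map (fun k => (k, st.1.getD k 0)) := by
    rw [PySem.Dict.items_eq_map_keys st.1 (by rw [hkeys1]; exact PySem.Set.nodup_ofList numerator) 0, hkeys1]
  have hitems2 : st.2.items = (PySem.Set.ofList denominator).map (fun k => (k, st.2.getD k 0)) := by
    rw [PySem.Dict.items_eq_map_keys st.2 (by rw [hkeys2]; exact PySem.Set.nodup_ofList denominator) 0, hkeys2]
  -- pointwise values of A's two dicts after the loop, for every key
  have hval1 : ∀ k, (st.1.getD k 0).toNat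
      = ((numerator.count k : Int) - (denominator.count k : Int)).toNat := by
    intro k
    by_cases hk : k ∈ numerator
    · have hmem : (k, (numerator.count k : Int)) ∈ (PySem.Dict.counter numerator).items := by
        rw [hitems]
        exact List.mem_map_of_mem ((PySem.Set.mem_ofList numerator k).2 hk)
      have h := (hpair _ hmem).1
      dsimp only at h
      rw [h]
      by_cases hd : k ∈ denominator
      · rw [if_pos hd]; split_ifs with hgt <;> omega
      · have hzero : denominator.count k = 0 := List.count_eq_zero.2 hd
        rw [if_neg hd, hzero]; simp
    · have hnk : k ∉ (PySem.Dict.counter numerator).items.map Prod.fst := by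
        rw [hmapfst]
        exact fun h => hk ((PySem.Set.mem_ofList numerator k).1 h)
      have h := (hout k hnk).1
      rw [h, PySem.Dict.getD_counter]
      have hzero : numerator.count k = 0 := List.count_eq_zero.2 hk
      rw [hzero]; simp
  have hval2 : ∀ k, (st.2.getD k 0).toNat
      = ((denominator.count k : Int) - (numerator.count k : Int)).toNat := by
    intro k
    by_cases hk : k ∈ numerator
    · have hmem : (k, (numerator.count k : Int)) ∈ (PySem.Dict.counter numerator).items := by
        rw [hitems]
        exact List.mem_map_of_mem ((PySem.Set.mem_ofList numerator k).2 hk)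
      have h := (hpair _ hmem).2
      dsimp only at h
      rw [h]
      have hpos : 0 < numerator.count k := List.count_pos_iff.2 hk
      by_cases hd : k ∈ denominator
      · rw [if_pos hd]; split_ifs with hgt <;> omega
      · have hzero : denominator.count k = 0 := List.count_eq_zero.2 hd
        rw [if_neg hd, hzero]; simp
    · have hnk : k ∉ (PySem.Dict.counter numerator).items.map Prod.fst := by
        rw [hmapfst]
        exact fun h => hk ((PySem.Set.mem_ofList numerator k).1 h)
      have h := (hout k hnk).2
      rw [h, PySem.Dict.getD_counter]
      have hzero : numerator.count k = 0 := List.count_eq_zero.2 hk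
      rw [hzero]; simp
  -- assemble
  show cancel_common_units numerator denominator = cancel_common_units_alt numerator denominator
  simp only [cancel_common_units, cancel_common_units_alt, flatten_list, ← hst]
  rw [residue_eq numerator denominator, residue_eq denominator numerator,
      hitems1, hitems2]
  rw [expandA (fun k => st.1.getD k 0) (PySem.Set.ofList numerator),
      expandA (fun k => st.2.getD k 0) (PySem.Set.ofList denominator)]
  rw [funext (fun k => congrArg (fun n => List.replicate n k) (hval1 k)),
      funext (fun k => congrArg (fun n => List.replicate n k) (hval2 k))]
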